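-- pv_equiv track=rewrite | github.com/alejoeyzaguirre/extra_python | L02/L02.py | es_estado_solucion
-- ===== SOURCE A (Python) =====
-- class Elemento:
--
--     def __init__(self, letra):
--         self.letra = letra
--         self.indices = []
--
--     def agregar_indice(self, string):
--         for i in range(len(string)):
--             if string[i] == self.letra:
--                 self.indices.append(i)
--
-- def elementizar(estructura):
--     dicc = dict()
--     for elem in estructura:
--         cosa = Elemento(elem)
--         cosa.agregar_indice(estructura)
--         dicc[elem] = cosa.indices
--     return dicc
--
-- def parcial_lista(resultado_parcial, estructura, mensaje):
--     lista = []
--     lista.append(mensaje[0:resultado_parcial[1]])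
--     for i in range(1, len(resultado_parcial)-1):
--         lista.append(mensaje[resultado_parcial[i]:resultado_parcial[i+1]])
--     return lista
--
-- def es_estado_solucion(resultado_parcial, estructura, mensaje):
--     if len(resultado_parcial) != (len(estructura) + 1) or resultado_parcial[-1] != (len(mensaje)):
--         return False
--
--     # Hago una lista que contiene cada slice del string correspondiente a cada letra de la estructura.
--     lista = parcial_lista(resultado_parcial, estructura, mensaje)
--     elementos = elementizar(estructura)
--
--     # Reviso que los slices del tipo X sean iguales entre sí...
--     for elem in elementos.values():
--         seteo = set()
--         for indiz in elem:
--             agrego = lista[indiz]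
--             seteo.add(agrego)
--         if len(seteo) > 1:
--             return False
--
--     return True
-- ===== SOURCE B (Python) =====
-- def es_estado_solucion(resultado_parcial, estructura, mensaje):
--     if len(resultado_parcial) != (len(estructura) + 1) or resultado_parcial[-1] != (len(mensaje)):
--         return False
--
--     def corte(i):
--         # same slice convention as the original: the first cut always starts at 0
--         if i == 0:
--             return mensaje[0:resultado_parcial[1]]
--         return mensaje[resultado_parcial[i]:resultado_parcial[i + 1]]
--
--     n = len(estructura)
--     return all(corte(i) == corte(j)
--                for i in range(n)
--                for j in range(i + 1, n)
--                if estructura[i] == estructura[j])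
-- ===== Notes on version B (the rewrite author's own statement) =====
-- stated objective: simpler
-- what changed: B drops A's per-letter index dictionary, slice-list and per-letter set construction, and instead compares the cut slices directly for every pair of equal structure letters (same guards, same first-cut-starts-at-0 slice convention).
-- crash fix: When estructura is empty and resultado_parcial == [len(mensaje)] both guards pass and A raises IndexError reading resultado_parcial[1]; B returns True (no letters, nothing to disagree). — e.g. on es_estado_solucion([0], "", ""): A raises IndexError, B returns true
import Mathlib
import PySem

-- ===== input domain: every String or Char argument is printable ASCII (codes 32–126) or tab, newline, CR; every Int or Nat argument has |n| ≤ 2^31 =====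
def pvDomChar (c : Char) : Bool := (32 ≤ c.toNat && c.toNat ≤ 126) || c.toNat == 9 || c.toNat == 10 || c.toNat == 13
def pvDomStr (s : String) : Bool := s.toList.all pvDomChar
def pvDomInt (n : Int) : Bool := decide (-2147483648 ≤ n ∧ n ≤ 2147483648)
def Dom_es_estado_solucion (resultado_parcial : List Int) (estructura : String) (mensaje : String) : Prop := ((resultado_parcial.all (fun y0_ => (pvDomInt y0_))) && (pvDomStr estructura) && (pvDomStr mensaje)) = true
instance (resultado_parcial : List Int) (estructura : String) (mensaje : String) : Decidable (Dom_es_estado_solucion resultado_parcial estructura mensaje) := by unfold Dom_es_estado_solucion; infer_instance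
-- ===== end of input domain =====

-- B replaces A's per-letter index dictionary plus slice-set construction by one direct
-- all-pairs comparison of the cut slices (same guards, same slice convention); objective: simpler.

-- ===== PORT A =====
-- Elemento.agregar_indice: 'for i in range(len(string)): if string[i] == letra: append i'
-- (i comes from range(len(string)), so s[i]? is always 'some'; the == some test is exact there)
def pvAgregarIndice (letra : Char) (s : List Char) : List Int :=
  (List.range s.length).foldl
    (fun acc (i : Nat) => if s[i]? == some letra then acc ++ [(i : Int)] else acc) []

def pvElementizar (s : List Char) : PySem.Dict Char (List Int) :=
  s.foldl (fun dicc elem => dicc.insert elem (pvAgregarIndice elem s)) PySem.Dict.empty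

-- parcial_lista: resultado_parcial[i] is in range whenever A reaches this call without
-- raising (the inputs where Python raises are outside Pre_), so pyGetD's default is never used
def pvParcialLista (resultado_parcial : List Int) (mensaje : String) : List String :=
  (PySem.List.pyRange 1 ((resultado_parcial.length : Int) - 1)).foldl
    (fun lista i => lista ++ [PySem.Str.slice mensaje (some (PySem.List.pyGetD resultado_parcial i 0)) (some (PySem.List.pyGetD resultado_parcial (i + 1) 0))])
    [PySem.Str.slice mensaje (some 0) (some (PySem.List.pyGetD resultado_parcial 1 0))]

-- the 'for elem in elementos.values()' loop with its early 'return False'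
def pvCheckVals (lista : List String) : List (List Int) → Bool
  | [] => true
  | elem :: rest =>
    let seteo : PySem.Set String :=
      elem.foldl (fun seteo indiz => PySem.Set.add seteo (PySem.List.pyGetD lista indiz "")) PySem.Set.empty
    if 1 < seteo.length then false else pvCheckVals lista rest

def es_estado_solucion (resultado_parcial : List Int) (estructura : String) (mensaje : String) : Bool :=
  if resultado_parcial.length ≠ estructura.toList.length + 1 ∨
      PySem.List.pyGetD resultado_parcial (-1) 0 ≠ (mensaje.toList.length : Int) then false
  else
    pvCheckVals (pvParcialLista resultado_parcial mensaje) (pvElementizar estructura.toList).values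

-- ===== PORT B =====
-- corte(i): the i-th cut of mensaje (the first cut always starts at 0, as in A's parcial_lista)
def pvCorte (resultado_parcial : List Int) (mensaje : String) (i : Nat) : String :=
  if i = 0 then PySem.Str.slice mensaje (some 0) (some (PySem.List.pyGetD resultado_parcial 1 0))
  else PySem.Str.slice mensaje (some (PySem.List.pyGetD resultado_parcial (i : Int) 0)) (some (PySem.List.pyGetD resultado_parcial ((i : Int) + 1) 0))

def es_estado_solucion_alt (resultado_parcial : List Int) (estructura : String) (mensaje : String) : Bool :=
  if resultado_parcial.length ≠ estructura.toList.length + 1 ∨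
      PySem.List.pyGetD resultado_parcial (-1) 0 ≠ (mensaje.toList.length : Int) then false
  else
    let n := estructura.toList.length
    (List.range n).all fun i =>
      (List.range' (i + 1) (n - (i + 1))).all fun j =>
        !(estructura.toList[i]? == estructura.toList[j]?) ||
          (pvCorte resultado_parcial mensaje i == pvCorte resultado_parcial mensaje j)

-- ===== PRECONDITION & SPEC =====
-- Pre_ excludes exactly the inputs where A raises IndexError: an empty estructura whose
-- resultado_parcial = [len(mensaje)] passes both guards and then parcial_lista reads resultado_parcial[1].
def Pre_es_estado_solucion (resultado_parcial : List Int) (estructura : String) (mensaje : String) : Prop :=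
  ¬ (estructura.toList = [] ∧ resultado_parcial = [(mensaje.toList.length : Int)])
instance (resultado_parcial : List Int) (estructura : String) (mensaje : String) : Decidable (Pre_es_estado_solucion resultado_parcial estructura mensaje) := by unfold Pre_es_estado_solucion; infer_instance

def pvWitness_es_estado_solucion : List Int × String × String := ([1, 2], "a", "xy")

-- On an empty estructura with resultado_parcial = [len(mensaje)], A raises IndexError reading
-- resultado_parcial[1]; B returns True (there are no letters whose cuts could disagree).
def Raises_es_estado_solucion (resultado_parcial : List Int) (estructura : String) (mensaje : String) : Prop :=
  estructura.toList = [] ∧ resultado_parcial = [(mensaje.toList.length : Int)]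
instance (resultado_parcial : List Int) (estructura : String) (mensaje : String) : Decidable (Raises_es_estado_solucion resultado_parcial estructura mensaje) := by unfold Raises_es_estado_solucion; infer_instance

def pvRaiseWitness_es_estado_solucion : List Int × String × String := ([0], "", "")
def pvRaiseWitnessOut_es_estado_solucion : Bool := true

def Spec_es_estado_solucion (resultado_parcial : List Int) (estructura : String) (mensaje : String) (out : Bool) : Prop := out = es_estado_solucion_alt resultado_parcial estructura mensaje
instance (resultado_parcial : List Int) (estructura : String) (mensaje : String) (out : Bool) : Decidable (Spec_es_estado_solucion resultado_parcial estructura mensaje out) := by unfold Spec_es_estado_solucion; infer_instance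

-- ===== CLAIM (what is proved, stated in full; the proofs are below) =====
def Claim_equal_es_estado_solucion : Prop := ∀ (resultado_parcial : List Int) (estructura : String) (mensaje : String), Dom_es_estado_solucion resultado_parcial estructura mensaje → Pre_es_estado_solucion resultado_parcial estructura mensaje → Spec_es_estado_solucion resultado_parcial estructura mensaje (es_estado_solucion resultado_parcial estructura mensaje)

def Claim_raises_es_estado_solucion : Prop := (∀ (resultado_parcial : List Int) (estructura : String) (mensaje : String), Dom_es_estado_solucion resultado_parcial estructura mensaje → Raises_es_estado_solucion resultado_parcial estructura mensaje → ¬ Pre_es_estado_solucion resultado_parcial estructura mensaje) ∧ (Dom_es_estado_solucion (pvRaiseWitness_es_estado_solucion.1) (pvRaiseWitness_es_estado_solucion.2.1) (pvRaiseWitness_es_estado_solucion.2.2) ∧ Raises_es_estado_solucion (pvRaiseWitness_es_estado_solucion.1) (pvRaiseWitness_es_estado_solucion.2.1) (pvRaiseWitness_es_estado_solucion.2.2) ∧ es_estado_solucion_alt (pvRaiseWitness_es_estado_solucion.1) (pvRaiseWitness_es_estado_solucion.2.1) (pvRaiseWitness_es_estado_solucion.2.2) = pvRaiseWitnessOut_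es_estado_solucion)

-- ===== LEMMAS AND PROOFS =====

lemma pv_mem_agregar (c : Char) (s : List Char) (x : Int) :
    x ∈ pvAgregarIndice c s ↔ ∃ i : Nat, i < s.length ∧ s[i]? = some c ∧ x = (i : Int) := by
  unfold pvAgregarIndice
  rw [PySem.List.foldl_append_if]
  simp only [List.nil_append, List.mem_map, List.mem_filter, List.mem_range, beq_iff_eq]
  constructor
  · rintro ⟨i, ⟨hi, hc⟩, rfl⟩; exact ⟨i, hi, hc, rfl⟩
  · rintro ⟨i, hi, hc, rfl⟩; exact ⟨i, ⟨hi, hc⟩, rfl⟩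

lemma pv_get?_foldl_insert (F : Char → List Int) (l : List Char) (d : PySem.Dict Char (List Int)) (k : Char) :
    (l.foldl (fun d c => d.insert c (F c)) d).get? k = if k ∈ l then some (F k) else d.get? k := by
  induction l generalizing d with
  | nil => simp
  | cons c t ih =>
    simp only [List.foldl_cons, ih, PySem.Dict.get?_insert, List.mem_cons]
    by_cases hk : k ∈ t
    · simp [hk]
    · by_cases hc : k = c <;> simp [hk, hc]

lemma pv_mem_keys_foldl_insert (F : Char → List Int) (l : List Char) (d : PySem.Dict Char (List Int)) (k : Char) :
    k ∈ (l.foldl (fun d c => d.insert c (F c)) d).keys ↔ k ∈ l ∨ k ∈ d.keys := by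
  induction l generalizing d with
  | nil => simp
  | cons c t ih =>
    simp only [List.foldl_cons, ih, PySem.Dict.mem_keys_insert, List.mem_cons]
    tauto

lemma pv_mem_values_elementizar (s : List Char) (l : List Int) :
    l ∈ (pvElementizar s).values ↔ ∃ c ∈ s, l = pvAgregarIndice c s := by
  have hnd : (pvElementizar s).keys.Nodup :=
    PySem.Dict.nodup_keys_foldl_insert s (fun _ c => pvAgregarIndice c s) PySem.Dict.empty
      (by simp [PySem.Dict.keys_empty])
  rw [PySem.Dict.values_eq_map_keys _ hnd []]
  simp only [List.mem_map]
  constructor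
  · rintro ⟨k, hk, rfl⟩
    have hkmem : k ∈ s := by
      have := (pv_mem_keys_foldl_insert (fun c => pvAgregarIndice c s) s PySem.Dict.empty k).mp hk
      simpa [PySem.Dict.keys_empty] using this
    refine ⟨k, hkmem, ?_⟩
    show (pvElementizar s).getD k [] = _
    unfold PySem.Dict.getD pvElementizar
    rw [pv_get?_foldl_insert]
    simp [hkmem]
  · rintro ⟨c, hc, rfl⟩
    refine ⟨c, ?_, ?_⟩
    · exact (pv_mem_keys_foldl_insert (fun c => pvAgregarIndice c s) s PySem.Dict.empty c).mpr (Or.inl hc)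
    · show (pvElementizar s).getD c [] = _
      unfold PySem.Dict.getD pvElementizar
      rw [pv_get?_foldl_insert]
      simp [hc]

lemma pv_checkvals_true_iff (lista : List String) (vals : List (List Int)) :
    pvCheckVals lista vals = true ↔
      ∀ elem ∈ vals, (PySem.Set.ofList (elem.map (fun i => PySem.List.pyGetD lista i ""))).length ≤ 1 := by
  induction vals with
  | nil => simp [pvCheckVals]
  | cons elem rest ih =>
    have hset : elem.foldl (fun st i => PySem.Set.add st (PySem.List.pyGetD lista i "")) PySem.Set.empty
        = PySem.Set.ofList (elem.map (fun i => PySem.List.pyGetD lista i "")) := by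
      rw [PySem.Set.ofList_eq_foldl, List.foldl_map]
      rfl
    simp only [pvCheckVals, hset]
    by_cases h : 1 < (PySem.Set.ofList (elem.map (fun i => PySem.List.pyGetD lista i ""))).length
    · rw [if_pos h]
      refine iff_of_false (by simp) ?_
      intro hall
      exact absurd (hall elem (List.mem_cons_self ..)) (by omega)
    · rw [if_neg h]
      rw [ih]
      simp only [List.mem_cons]
      constructor
      · rintro hrest e (rfl | he)
        · omega
        · exact hrest e he
      · intro hall e he
        exact hall e (Or.inr he)

lemma pv_set_len_le_one (xs : List String) :
    (PySem.Set.ofList xs).length ≤ 1 ↔ ∀ a ∈ xs, ∀ b ∈ xs, a = b := by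
  constructor
  · intro h a ha b hb
    have ha' : a ∈ PySem.Set.ofList xs := (PySem.Set.mem_ofList _ _).mpr ha
    have hb' : b ∈ PySem.Set.ofList xs := (PySem.Set.mem_ofList _ _).mpr hb
    match hl : PySem.Set.ofList xs with
    | [] => rw [hl] at ha'; exact absurd ha' (List.not_mem_nil)
    | [x] =>
      rw [hl] at ha' hb'
      simp only [List.mem_singleton] at ha' hb'
      rw [ha', hb']
    | x :: y :: t => rw [hl] at h; simp at h
  · intro h
    by_contra hlen
    push_neg at hlen
    have hnd : (PySem.Set.ofList xs).Nodup := PySem.Set.nodup_ofList xs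
    match hl : PySem.Set.ofList xs with
    | [] => rw [hl] at hlen; simp at hlen
    | [x] => rw [hl] at hlen; simp at hlen
    | x :: y :: t =>
      rw [hl] at hnd
      have hx : x ∈ xs := (PySem.Set.mem_ofList _ _).mp (by rw [hl]; simp)
      have hy : y ∈ xs := (PySem.Set.mem_ofList _ _).mp (by rw [hl]; simp)
      have : x = y := h x hx y hy
      simp [this] at hnd

lemma pv_pyRange_natCast (k : Nat) : ∀ (a b : Nat), b - a = k →
    PySem.List.pyRange (a : Int) (b : Int) = (List.range' a k).map (fun (j : Nat) => (j : Int)) := by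
  induction k with
  | zero =>
    intro a b h
    rw [PySem.List.pyRange_one_eq_nil (by exact_mod_cast Nat.le_of_sub_eq_zero h)]
    simp
  | succ m ih =>
    intro a b h
    have hab : a < b := by omega
    rw [PySem.List.pyRange_one_cons (by exact_mod_cast hab)]
    have hcast : ((a : Int) + 1) = ((a + 1 : Nat) : Int) := by push_cast; ring
    rw [hcast, ih (a + 1) b (by omega), List.range'_succ]
    simp

lemma pv_lista_eq (rp : List Int) (men : String) (n : Nat)
    (hlen : rp.length = n + 1) (hn : 1 ≤ n) :
    pvParcialLista rp men = (List.range n).map (pvCorte rp men) := by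
  unfold pvParcialLista
  rw [PySem.List.foldl_append_singleton_eq_map]
  have hb : ((rp.length : Int) - 1) = ((n : Nat) : Int) := by rw [hlen]; push_cast; ring
  have h1 := pv_pyRange_natCast (n - 1) 1 n (by omega)
  rw [Nat.cast_one] at h1
  rw [hb, h1, List.map_map]
  have hrange : List.range n = 0 :: List.range' 1 (n - 1) := by
    rw [List.range_eq_range']
    have : n = (n - 1) + 1 := by omega
    rw [this, List.range'_succ]
    simp
  rw [hrange, List.map_cons, List.singleton_append]
  apply congrArg₂ List.cons
  · simp [pvCorte]
  · apply List.map_congr_left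
    intro j hj
    obtain ⟨i0, _, rfl⟩ := List.mem_range'.mp hj
    simp only [Function.comp_apply, pvCorte, if_neg (by omega : ¬ 1 + 1 * i0 = 0)]

lemma pv_corte_of_pyGetD (rp : List Int) (men : String) (n i : Nat) (hi : i < n) :
    PySem.List.pyGetD ((List.range n).map (pvCorte rp men)) ((i : Nat) : Int) ""
      = pvCorte rp men i := by
  rw [PySem.List.pyGetD_natCast, PySem.List.getD_map_range _ _ _ _ hi]

-- ===== VERDICT (by name: the statement is the Claim_ definition above) =====
theorem es_estado_solucion_raises : Claim_raises_es_estado_solucion := by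
  unfold Claim_raises_es_estado_solucion
  refine ⟨?_, by decide⟩
  intro rp est men _ hr hp
  exact hp hr

theorem es_estado_solucion_spec : Claim_equal_es_estado_solucion := by
  intro rp est men _hdom hpre
  unfold Spec_es_estado_solucion
  by_cases hg : rp.length ≠ est.toList.length + 1 ∨
      PySem.List.pyGetD rp (-1) 0 ≠ (men.toList.length : Int)
  · unfold es_estado_solucion es_estado_solucion_alt
    rw [if_pos hg, if_pos hg]
  · push_neg at hg
    obtain ⟨hlen, hlast⟩ := hg
    set n := est.toList.length with hn
    have hn1 : 1 ≤ n := by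
      by_contra h
      have hn0 : n = 0 := by omega
      have hest : est.toList = [] := List.eq_nil_of_length_eq_zero (hn ▸ hn0)
      have hrp1 : rp.length = 1 := by omega
      obtain ⟨x, hx⟩ := List.length_eq_one_iff.mp hrp1
      have hne : rp ≠ [] := by rw [hx]; simp
      have : PySem.List.pyGetD rp (-1) 0 = x := by
        rw [PySem.List.pyGetD_neg_one rp 0 hne]
        simp [hx]
      have hxval : x = (men.toList.length : Int) := by rw [← this, hlast]
      -- this input is exactly one where A raises, and those lie outside Pre_
      have hrr := es_estado_solucion_raises
      unfold Claim_raises_es_estado_solucion at hrr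
      exact hrr.1 rp est men _hdom ⟨hest, by rw [hx, hxval]⟩ hpre
    rw [show es_estado_solucion rp est men
        = pvCheckVals (pvParcialLista rp men) (pvElementizar est.toList).values from by
      unfold es_estado_solucion
      rw [if_neg (by push_neg; exact ⟨hlen, hlast⟩)]]
    rw [show es_estado_solucion_alt rp est men
        = ((List.range n).all fun i =>
            (List.range' (i + 1) (n - (i + 1))).all fun j =>
              !(est.toList[i]? == est.toList[j]?) ||
                (pvCorte rp men i == pvCorte rp men j)) from by
      unfold es_estado_solucion_alt
      rw [if_neg (by push_neg; exact ⟨hlen, hlast⟩)]]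
    rw [Bool.eq_iff_iff]
    rw [pv_checkvals_true_iff, pv_lista_eq rp men n hlen hn1]
    have hB : (((List.range n).all fun i =>
            (List.range' (i + 1) (n - (i + 1))).all fun j =>
              !(est.toList[i]? == est.toList[j]?) ||
                (pvCorte rp men i == pvCorte rp men j)) = true)
        ↔ ∀ i j : Nat, i < j → j < n → est.toList[i]? = est.toList[j]? →
            pvCorte rp men i = pvCorte rp men j := by
      simp only [List.all_eq_true, List.mem_range, List.mem_range', Bool.or_eq_true,
        Bool.not_eq_eq_eq_not, Bool.not_true, beq_eq_false_iff_ne, ne_eq, beq_iff_eq]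
      constructor
      · intro h i j hij hjn heq
        have hin : i < n := lt_trans hij hjn
        rcases h i hin j ⟨j - (i + 1), by omega, by omega⟩ with hne | he
        · exact absurd heq hne
        · exact he
      · intro h i hin j hj
        rcases hj with ⟨t, ht, rfl⟩
        by_cases heq : est.toList[i]? = est.toList[i + 1 + 1 * t]?
        · exact Or.inr (h i (i + 1 + 1 * t) (by omega) (by omega) heq)
        · exact Or.inl heq
    rw [hB]
    constructor
    · -- A true → B true
      intro hA i j hij hjn heq
      have hin : i < n := lt_trans hij hjn
      have hiv : est.toList[i]? = some (est.toList[i]'(hn ▸ hin)) := by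
        simp
      have hc : est.toList[i]'(hn ▸ hin) ∈ est.toList := List.getElem_mem _
      have := hA (pvAgregarIndice (est.toList[i]'(hn ▸ hin)) est.toList)
        ((pv_mem_values_elementizar _ _).mpr ⟨_, hc, rfl⟩)
      rw [pv_set_len_le_one] at this
      have hmi : pvCorte rp men i ∈ (pvAgregarIndice (est.toList[i]'(hn ▸ hin)) est.toList).map
          (fun x => PySem.List.pyGetD ((List.range n).map (pvCorte rp men)) x "") := by
        refine List.mem_map.mpr ⟨(i : Int), ?_, ?_⟩
        · exact (pv_mem_agregar _ _ _).mpr ⟨i, hn ▸ hin, hiv, rfl⟩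
        · exact pv_corte_of_pyGetD rp men n i hin
      have hmj : pvCorte rp men j ∈ (pvAgregarIndice (est.toList[i]'(hn ▸ hin)) est.toList).map
          (fun x => PySem.List.pyGetD ((List.range n).map (pvCorte rp men)) x "") := by
        refine List.mem_map.mpr ⟨(j : Int), ?_, ?_⟩
        · exact (pv_mem_agregar _ _ _).mpr ⟨j, hn ▸ hjn, by rw [← heq, hiv], rfl⟩
        · exact pv_corte_of_pyGetD rp men n j hjn
      exact this _ hmi _ hmj
    · -- B true → A true
      intro hB' elem helem
      rw [pv_set_len_le_one]
      obtain ⟨c, _hc, rfl⟩ := (pv_mem_values_elementizar _ _).mp helem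
      intro a ha b hb
      obtain ⟨xa, hxa, rfl⟩ := List.mem_map.mp ha
      obtain ⟨xb, hxb, rfl⟩ := List.mem_map.mp hb
      obtain ⟨i, hin', hic, rfl⟩ := (pv_mem_agregar _ _ _).mp hxa
      obtain ⟨j, hjn', hjc, rfl⟩ := (pv_mem_agregar _ _ _).mp hxb
      have hin : i < n := hn ▸ hin'
      have hjn : j < n := hn ▸ hjn'
      rw [pv_corte_of_pyGetD rp men n i hin, pv_corte_of_pyGetD rp men n j hjn]
      have heq : est.toList[i]? = est.toList[j]? := by rw [hic, hjc]
      rcases lt_trichotomy i j with hij | rfl | hji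
      · exact hB' i j hij hjn heq
      · rfl
      · exact (hB' j i hji hin heq.symm).symm
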